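-- pv_equiv track=rewrite | github.com/collinsakenga/codewars_solutions | 6 kyu/6 kyu_A Rule of Divisibility by 13.py | thirt
-- ===== SOURCE A (Python) =====
-- def thirt(n):
--     pattern = [1, 10, 9, 12, 3, 4]
--     compare = n
--     index = 0
--     temp = 0
--     while True:
--         for i in str(compare)[::-1]:
--             temp += int(i)*pattern[index % 6]
--             index += 1
--         index = 0
--         if temp == compare:
--             return temp
--         compare = temp
--         temp = 0
-- ===== SOURCE B (Python) =====
-- def thirt(n):
--     pattern = (1, 10, 9, 12, 3, 4)
--     s, m, i = 0, n, 0
--     while m > 0: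
--         s += (m % 10) * pattern[i % 6]
--         m //= 10
--         i += 1
--     return s if s == n else thirt(s)
-- ===== Notes on version B (the rewrite author's own statement) =====
-- stated objective: alternative
-- what changed: A's flat while-True loop with string-based digit extraction (str(compare)[::-1], int(i)) and an explicit accumulator/index reset is replaced by a recursive fixed point over an arithmetic weighted digit sum computed with % 10 and // 10, with no string conversion at all.
import Mathlib
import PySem

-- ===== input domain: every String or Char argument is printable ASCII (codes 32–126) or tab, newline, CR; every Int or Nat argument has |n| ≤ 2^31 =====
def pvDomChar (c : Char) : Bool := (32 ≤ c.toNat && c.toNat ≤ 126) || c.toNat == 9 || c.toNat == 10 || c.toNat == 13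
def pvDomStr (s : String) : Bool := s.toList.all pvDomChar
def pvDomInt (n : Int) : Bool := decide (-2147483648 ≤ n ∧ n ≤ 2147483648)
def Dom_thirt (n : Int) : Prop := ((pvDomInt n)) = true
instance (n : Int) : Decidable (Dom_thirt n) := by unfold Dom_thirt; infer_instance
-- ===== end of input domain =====

-- B replaces A's while-loop with string digit extraction by a recursive fixed point
-- over an arithmetic (% 10, // 10) weighted digit sum; objective: alternative.

-- ===== PORT A =====
-- pattern = [1, 10, 9, 12, 3, 4]
def thirtPattern : List Int := [1, 10, 9, 12, 3, 4]

-- body of A's for-loop: state (temp, index); 'int(i)' is PySem.Int.ofChars? [c]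
-- (.getD 0 never fires under Pre_: every character is then a decimal digit);
-- pattern[index % 6] is always in range, so pyGetD is exact.
def thirtStepA (ti : Int × Int) (c : Char) : Int × Int :=
  (ti.1 + (PySem.Int.ofChars? [c]).getD 0 *
      PySem.List.pyGetD thirtPattern (PySem.Int.mod ti.2 6) 0,
   ti.2 + 1)

-- A's 'while True' loop; fuel is only a totality guard (never exhausted when 0 ≤ n:
-- one pass fixes every n < 100 and strictly decreases every n ≥ 100)
def thirtLoopA (fuel : Nat) (compare : Int) : Int :=
  match fuel with
  | 0 => compare
  | f + 1 =>
    let temp := (((PySem.Int.toChars compare).reverse).foldl thirtStepA (0, 0)).1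
    if temp = compare then temp else thirtLoopA f temp

def thirt (n : Int) : Int := thirtLoopA (n.toNat + 2) n

-- ===== PORT B =====
def thirtPatternB : List Int := [1, 10, 9, 12, 3, 4]

-- B's inner 'while m > 0' accumulator loop (arithmetic digits, low to high)
def thirtSumB (s m i : Int) : Int :=
  if h : m > 0 then
    thirtSumB (s + PySem.Int.mod m 10 *
        PySem.List.pyGetD thirtPatternB (PySem.Int.mod i 6) 0)
      (PySem.Int.floordiv m 10) (i + 1)
  else s
termination_by m.toNat
decreasing_by
  have hm : m = ((m.toNat : Nat) : Int) := by omega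
  have hdiv := PySem.Int.floordiv_natCast m.toNat 10
  rw [← hm] at hdiv
  simp only [Nat.cast_ofNat] at hdiv
  rw [hdiv]
  simp only [Int.toNat_natCast]
  exact Nat.div_lt_self (by omega) (by omega)

-- B's recursive fixed point; fuel is only a totality guard (same bound as A's port)
def thirtFixB (fuel : Nat) (n : Int) : Int :=
  match fuel with
  | 0 => n
  | f + 1 =>
    let s := thirtSumB 0 n 0
    if s = n then s else thirtFixB f s

def thirt_alt (n : Int) : Int := thirtFixB (n.toNat + 2) n

-- ===== PRECONDITION & SPEC =====
-- Pre_ excludes exactly the negative inputs: there str(compare) starts with '-' and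
-- A raises ValueError at int('-').
def Pre_thirt (n : Int) : Prop := 0 ≤ n
instance (n : Int) : Decidable (Pre_thirt n) := by unfold Pre_thirt; infer_instance
def pvWitness_thirt : Int := 1234

def Spec_thirt (n : Int) (out : Int) : Prop := out = thirt_alt n
instance (n : Int) (out : Int) : Decidable (Spec_thirt n out) := by unfold Spec_thirt; infer_instance

-- ===== CLAIM (what is proved, stated in full; the proofs are below) =====
def Claim_equal_thirt : Prop := ∀ (n : Int), Dom_thirt n → Pre_thirt n → Spec_thirt n (thirt n)

-- ===== LEMMAS AND PROOFS =====

-- MSB-first decimal digit list (proof-side mirror of Nat.toDigits 10)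
def digitsRec (n : Nat) : List Char :=
  if h : n < 10 then [Nat.digitChar n]
  else digitsRec (n / 10) ++ [Nat.digitChar (n % 10)]
termination_by n
decreasing_by exact Nat.div_lt_self (by omega) (by omega)

lemma toDigitsCore_acc (f : Nat) : ∀ (n : Nat) (ds : List Char),
    Nat.toDigitsCore 10 f n ds = Nat.toDigitsCore 10 f n [] ++ ds := by
  induction f with
  | zero => intro n ds; simp [Nat.toDigitsCore]
  | succ f ih =>
    intro n ds
    simp only [Nat.toDigitsCore]
    by_cases h : n / 10 = 0
    · simp [h]
    · simp only [h, if_false]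
      rw [ih (n / 10) ((n % 10).digitChar :: ds), ih (n / 10) [(n % 10).digitChar]]
      simp

lemma toDigitsCore_eq_digitsRec : ∀ (f n : Nat), n < f →
    Nat.toDigitsCore 10 f n [] = digitsRec n := by
  intro f
  induction f with
  | zero => intro n h; omega
  | succ f ih =>
    intro n hn
    simp only [Nat.toDigitsCore]
    by_cases h : n / 10 = 0
    · have h10 : n < 10 := by omega
      have : n % 10 = n := Nat.mod_eq_of_lt h10
      rw [digitsRec]; simp [h, h10, this]
    · have h10 : ¬ n < 10 := by
        intro hlt; exact h (Nat.div_eq_of_lt hlt)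
      have hrec : n / 10 < f := by
        have := Nat.div_lt_self (by omega : 0 < n) (by omega : 1 < 10)
        omega
      rw [digitsRec]
      simp only [h, if_false, h10, dif_neg, not_false_iff]
      rw [toDigitsCore_acc, ih (n / 10) hrec]

lemma toChars_nonneg (c : Int) (hc : 0 ≤ c) :
    PySem.Int.toChars c = digitsRec c.toNat := by
  simp only [PySem.Int.toChars, if_neg (by omega : ¬ c < 0)]
  exact toDigitsCore_eq_digitsRec _ _ (Nat.lt_succ_self _)

lemma ofChars_digitChar (d : Nat) (hd : d < 10) :
    (PySem.Int.ofChars? [Nat.digitChar d]).getD 0 = (d : Int) := by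
  interval_cases d <;> decide

lemma sumB_pos (s m i : Int) (h : m > 0) :
    thirtSumB s m i = thirtSumB (s + PySem.Int.mod m 10 *
      PySem.List.pyGetD thirtPatternB (PySem.Int.mod i 6) 0)
      (PySem.Int.floordiv m 10) (i + 1) := by
  conv_lhs => unfold thirtSumB
  simp [h]

lemma sumB_nonpos (s m i : Int) (h : ¬ m > 0) : thirtSumB s m i = s := by
  conv_lhs => unfold thirtSumB
  simp [h]

lemma foldA_eq_sumB : ∀ (n : Nat) (t i : Int),
    ((digitsRec n).reverse.foldl thirtStepA (t, i)).1 = thirtSumB t (n : Int) i := by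
  intro n
  induction n using Nat.strong_induction_on with
  | _ n ih =>
    intro t i
    have hmod : PySem.Int.mod ((n : Int)) 10 = ((n % 10 : Nat) : Int) := by
      exact_mod_cast PySem.Int.mod_natCast n 10
    have hdiv : PySem.Int.floordiv ((n : Int)) 10 = ((n / 10 : Nat) : Int) := by
      exact_mod_cast PySem.Int.floordiv_natCast n 10
    by_cases h : n < 10
    · rw [digitsRec]
      simp only [h, dif_pos, List.reverse_singleton, List.foldl_cons,
        List.foldl_nil, thirtStepA]
      rw [ofChars_digitChar n h]
      by_cases h0 : n = 0
      · subst h0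
        rw [sumB_nonpos t _ i (by omega)]
        simp
      · have hpos : ((n : Int)) > 0 := by omega
        rw [sumB_pos t _ i hpos, hmod, hdiv, Nat.mod_eq_of_lt h, Nat.div_eq_of_lt h]
        rw [sumB_nonpos _ _ _ (by omega)]
        simp [thirtPattern, thirtPatternB]
    · rw [digitsRec]
      simp only [h, dif_neg, not_false_iff, List.reverse_append,
        List.reverse_singleton, List.singleton_append, List.foldl_cons]
      have hstep : thirtStepA (t, i) (Nat.digitChar (n % 10)) =
          (t + ((n % 10 : Nat) : Int) *
            PySem.List.pyGetD thirtPattern (PySem.Int.mod i 6) 0, i + 1) := by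
        simp [thirtStepA, ofChars_digitChar (n % 10) (Nat.mod_lt _ (by omega))]
      rw [hstep]
      rw [ih (n / 10) (Nat.div_lt_self (by omega) (by omega))]
      have hpos : ((n : Int)) > 0 := by omega
      rw [sumB_pos t _ i hpos, hmod, hdiv]
      simp [thirtPattern, thirtPatternB]

lemma pat_nonneg (i : Int) :
    0 ≤ PySem.List.pyGetD thirtPatternB (PySem.Int.mod i 6) 0 := by
  have h0 : 0 ≤ PySem.Int.mod i 6 := PySem.Int.mod_nonneg i (by omega)
  have h6 : PySem.Int.mod i 6 < 6 := PySem.Int.mod_lt i (by omega)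
  set j := PySem.Int.mod i 6 with hj
  interval_cases j <;> decide

lemma sumB_nonneg : ∀ (m : Nat) (s i : Int), 0 ≤ s → 0 ≤ thirtSumB s (m : Int) i := by
  intro m
  induction m using Nat.strong_induction_on with
  | _ m ih =>
    intro s i hs
    by_cases h : ((m : Int)) > 0
    · rw [sumB_pos s _ i h]
      rw [show PySem.Int.mod ((m : Int)) 10 = ((m % 10 : Nat) : Int) from by
            exact_mod_cast PySem.Int.mod_natCast m 10,
          show PySem.Int.floordiv ((m : Int)) 10 = ((m / 10 : Nat) : Int) from by
            exact_mod_cast PySem.Int.floordiv_natCast m 10]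
      apply ih (m / 10) (Nat.div_lt_self (by omega) (by omega))
      have hp := pat_nonneg i
      positivity
    · rw [sumB_nonpos s _ i h]; exact hs

lemma loopA_eq_fixB : ∀ (fuel : Nat) (c : Int), 0 ≤ c →
    thirtLoopA fuel c = thirtFixB fuel c := by
  intro fuel
  induction fuel with
  | zero => intro c _; rfl
  | succ f ih =>
    intro c hc
    show thirtLoopA (f + 1) c = thirtFixB (f + 1) c
    rw [thirtLoopA, thirtFixB]
    have hpass : (((PySem.Int.toChars c).reverse).foldl thirtStepA (0, 0)).1 =
        thirtSumB 0 c 0 := by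
      rw [toChars_nonneg c hc, foldA_eq_sumB]
      congr 1
      omega
    simp only [hpass]
    by_cases heq : thirtSumB 0 c 0 = c
    · simp [heq]
    · simp only [heq, if_false]
      apply ih
      have : 0 ≤ thirtSumB 0 ((c.toNat : Nat) : Int) 0 := sumB_nonneg c.toNat 0 0 le_rfl
      rwa [Int.toNat_of_nonneg hc] at this

-- ===== VERDICT (by name: the statement is the Claim_ definition above) =====
theorem thirt_spec : Claim_equal_thirt := by
  intro n _ hpre
  unfold Spec_thirt thirt thirt_alt
  exact loopA_eq_fixB _ n hpre
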